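-- pv_equiv track=rewrite | github.com/gregxsunday/filter-chrome-cache | filter_chrome_cache.py | terminator_index
-- ===== SOURCE A (Python) =====
-- def terminator_index(url):
--     terminators = ['<!--', '?', '<', '>', 'META-INF', 'WEB-INF', '#', 'HTTP/1.1', '{', '*', ',', ' ', '$', '}', '{}']
--
--     end = len(url)
--     for term in terminators:
--         index = url.find(term)
--         if index != -1:
--             potential_end = index
--             end = potential_end if potential_end < end else end
--     return end
-- ===== SOURCE B (Python) =====
-- def terminator_index(url):
--     terminators = ['<!--', '?', '<', '>', 'META-INF', 'WEB-INF', '#', 'HTTP/1.1', '{', '*', ',', ' ', '$', '}', '{}']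
--     for i in range(len(url)):
--         for term in terminators:
--             if url.startswith(term, i):
--                 return i
--     return len(url)
-- ===== Notes on version B (the rewrite author's own statement) =====
-- stated objective: alternative
-- what changed: Replaces 15 separate url.find scans with a running minimum by one left-to-right positional scan that returns the first index at which any terminator starts.
import Mathlib
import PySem

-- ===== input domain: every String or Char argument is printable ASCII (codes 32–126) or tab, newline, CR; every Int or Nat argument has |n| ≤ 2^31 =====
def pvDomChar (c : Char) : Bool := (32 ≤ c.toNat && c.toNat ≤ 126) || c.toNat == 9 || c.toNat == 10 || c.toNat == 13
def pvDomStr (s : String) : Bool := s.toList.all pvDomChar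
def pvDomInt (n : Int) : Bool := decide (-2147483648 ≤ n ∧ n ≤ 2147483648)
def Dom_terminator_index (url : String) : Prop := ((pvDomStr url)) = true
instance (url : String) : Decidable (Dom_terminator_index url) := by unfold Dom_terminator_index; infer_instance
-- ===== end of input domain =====

-- B replaces A's 15 separate find scans + running minimum by one left-to-right
-- positional scan returning the first index where any terminator starts (objective: alternative).

-- ===== PORT A =====
def pvTerms : List String :=
  ["<!--", "?", "<", ">", "META-INF", "WEB-INF", "#", "HTTP/1.1", "{", "*", ",", " ", "$", "}", "{}"]

def terminator_index (url : String) : Int :=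
  pvTerms.foldl (fun e term =>
    let index := PySem.Str.find url term
    if index ≠ -1 then
      (if index < e then index else e)
    else e) (PySem.Str.len url)

-- ===== PORT B =====
-- the scan 'for i in range(len(url)): if any startswith at i: return i' as suffix recursion
def pvScan : List Char → Nat
  | [] => 0
  | c :: rest =>
    if pvTerms.any (fun t => PySem.Chars.startswith (c :: rest) t.toList) then 0
    else pvScan rest + 1

def terminator_index_alt (url : String) : Int := (pvScan url.toList : Int)

-- ===== PRECONDITION & SPEC =====
def Spec_terminator_index (url : String) (out : Int) : Prop := out = terminator_index_alt url
instance (url : String) (out : Int) : Decidable (Spec_terminator_index url out) := by unfold Spec_terminator_index; infer_instance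

-- ===== CLAIM (what is proved, stated in full; the proofs are below) =====
def Claim_equal_terminator_index : Prop := ∀ (url : String), Dom_terminator_index url → Spec_terminator_index url (terminator_index url)

-- ===== LEMMAS AND PROOFS =====

-- "some terminator starts at position j of s"
def pvM (s : List Char) (j : Nat) : Prop := ∃ t ∈ pvTerms, t.toList <+: s.drop j

lemma pvScan_le (s : List Char) : pvScan s ≤ s.length := by
  induction s with
  | nil => simp [pvScan]
  | cons c rest ih =>
    simp only [pvScan, List.length_cons]
    split
    · omega
    · omega

lemma pvScan_not_before (s : List Char) : ∀ j < pvScan s, ¬ pvM s j := by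
  induction s with
  | nil => simp [pvScan]
  | cons c rest ih =>
    intro j hj
    simp only [pvScan] at hj
    split at hj
    · omega
    · rename_i hany
      cases j with
      | zero =>
        intro ⟨t, ht, hpre⟩
        exact hany (List.any_eq_true.mpr ⟨t, ht, by
          simpa using (PySem.Chars.startswith_iff (c :: rest) t.toList).mpr (by simpa using hpre)⟩)
      | succ j' =>
        have := ih j' (by omega)
        intro ⟨t, ht, hpre⟩
        exact this ⟨t, ht, by simpa using hpre⟩

lemma pvScan_hit (s : List Char) (h : pvScan s < s.length) : pvM s (pvScan s) := by
  induction s with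
  | nil => simp [pvScan] at h
  | cons c rest ih =>
    simp only [pvScan] at h ⊢
    split
    · rename_i hany
      obtain ⟨t, ht, hsw⟩ := List.any_eq_true.mp hany
      exact ⟨t, ht, by simpa using (PySem.Chars.startswith_iff (c :: rest) t.toList).mp hsw⟩
    · rename_i hany
      rw [if_neg hany] at h
      have := ih (by simp only [List.length_cons] at h; omega)
      obtain ⟨t, ht, hpre⟩ := this
      exact ⟨t, ht, by simpa using hpre⟩

-- characterization of A's foldl accumulator
lemma pvFoldA (s : List Char) (terms : List String) : ∀ e : Int,
    (terms.foldl (fun e term =>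
      let index := PySem.Chars.find s term.toList
      if index ≠ -1 then (if index < e then index else e) else e) e ≤ e)
  ∧ (terms.foldl (fun e term =>
      let index := PySem.Chars.find s term.toList
      if index ≠ -1 then (if index < e then index else e) else e) e = e
     ∨ ∃ t ∈ terms, (terms.foldl (fun e term =>
      let index := PySem.Chars.find s term.toList
      if index ≠ -1 then (if index < e then index else e) else e) e) = PySem.Chars.find s t.toList
        ∧ t.toList <:+: s)
  ∧ (∀ t ∈ terms, t.toList <:+: s →
      terms.foldl (fun e term =>
      let index := PySem.Chars.find s term.toList
      if index ≠ -1 then (if index < e then index else e) else e) e ≤ PySem.Chars.find s t.toList) := by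
  induction terms with
  | nil => intro e; refine ⟨le_refl _, Or.inl rfl, by simp⟩
  | cons t ts ih =>
    intro e
    simp only [List.foldl_cons]
    set e' := (let index := PySem.Chars.find s t.toList
      if index ≠ -1 then (if index < e then index else e) else e) with he'
    obtain ⟨ihle, ihcases, ihmin⟩ := ih e'
    have he'le : e' ≤ e := by
      rw [he']; dsimp only; split_ifs <;> omega
    have he'cases : e' = e ∨ (e' = PySem.Chars.find s t.toList ∧ t.toList <:+: s) := by
      rw [he']; dsimp only; split_ifs with h1 h2
      · exact Or.inr ⟨rfl, (PySem.Chars.find_ne_neg_one_iff s t.toList).mp h1⟩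
      · exact Or.inl rfl
      · exact Or.inl rfl
    refine ⟨le_trans ihle he'le, ?_, ?_⟩
    · rcases ihcases with h | ⟨u, hu, hfu, hinf⟩
      · rcases he'cases with h2 | ⟨h2, hinf⟩
        · exact Or.inl (h.trans h2)
        · exact Or.inr ⟨t, by simp, h.trans h2, hinf⟩
      · exact Or.inr ⟨u, List.mem_cons_of_mem _ hu, hfu, hinf⟩
    · intro u hu hinf
      rcases List.mem_cons.mp hu with rfl | hu
      · -- u = t: e' ≤ find s t
        have hne : PySem.Chars.find s u.toList ≠ -1 :=
          (PySem.Chars.find_ne_neg_one_iff s u.toList).mpr hinf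
        have : e' ≤ PySem.Chars.find s u.toList := by
          rw [he']; dsimp only; split_ifs <;> omega
        exact le_trans ihle this
      · exact ihmin u hu hinf

lemma pv_prefix_drop_infix {t s : List Char} {j : Nat} (h : t <+: s.drop j) : t <:+: s :=
  h.isInfix.trans (s.drop_suffix j).isInfix

lemma pv_find_le_of_prefix_drop {t s : List Char} {j : Nat} (h : t <+: s.drop j) :
    PySem.Chars.find s t ≤ (j : Int) := by
  have hinf : t <:+: s := pv_prefix_drop_infix h
  have hnn : 0 ≤ PySem.Chars.find s t := (PySem.Chars.find_nonneg_iff s t).mpr hinf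
  obtain ⟨-, hmin⟩ := PySem.Chars.find_spec (s := s) (sub := t) hnn
  by_contra hlt
  push Not at hlt
  exact hmin j (by omega) h

lemma pv_main (url : String) : terminator_index url = terminator_index_alt url := by
  unfold terminator_index terminator_index_alt
  set s := url.toList with hs
  have hlen : PySem.Str.len url = (s.length : Int) := by simp [hs]
  have hfun : (fun (e : Int) (term : String) =>
      let index := PySem.Str.find url term
      if index ≠ -1 then (if index < e then index else e) else e)
    = (fun (e : Int) (term : String) =>
      let index := PySem.Chars.find s term.toList
      if index ≠ -1 then (if index < e then index else e) else e) := by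
    funext e term; simp [hs]
  rw [hfun, hlen]
  obtain ⟨hle, hcases, hmin⟩ := pvFoldA s pvTerms ((s.length : Int))
  set r := pvTerms.foldl (fun e term =>
      let index := PySem.Chars.find s term.toList
      if index ≠ -1 then (if index < e then index else e) else e) ((s.length : Int)) with hr
  set n := pvScan s with hn
  have hnlen : n ≤ s.length := pvScan_le s
  have hrnn : 0 ≤ r := by
    rcases hcases with h | ⟨t, ht, hf, hinf⟩
    · rw [h]; positivity
    · rw [hf]; exact (PySem.Chars.find_nonneg_iff s t.toList).mpr hinf
  -- r ≤ n
  have hrn : r ≤ (n : Int) := by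
    by_cases h : n = s.length
    · rw [h]; exact hle
    · have hlt : n < s.length := lt_of_le_of_ne hnlen h
      obtain ⟨t, ht, hpre⟩ := pvScan_hit s hlt
      have h1 := hmin t ht (pv_prefix_drop_infix hpre)
      have h2 := pv_find_le_of_prefix_drop hpre
      omega
  -- n ≤ r
  have hnr : (n : Int) ≤ r := by
    by_contra hlt
    push Not at hlt
    have hjr : r.toNat < n := by omega
    have hnM := pvScan_not_before s r.toNat hjr
    rcases hcases with h | ⟨t, ht, hf, hinf⟩
    · omega
    · have hnn : 0 ≤ PySem.Chars.find s t.toList := hf ▸ hrnn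
      obtain ⟨hpre, -⟩ := PySem.Chars.find_spec (s := s) (sub := t.toList) hnn
      exact hnM ⟨t, ht, by rw [hf]; exact hpre⟩
  omega

-- ===== VERDICT (by name: the statement is the Claim_ definition above) =====
theorem terminator_index_spec : Claim_equal_terminator_index := by
  intro url _
  exact pv_main url
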